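-- pv_equiv track=rewrite | github.com/Lucessy/advent-of-code-2022 | Cuadernillo 4/1_2.py | suma_dos_listas
-- ===== SOURCE A (Python) =====
-- def suma_dos_listas (lista1,lista2):
--     '''lista(int),lista(int) -> lista(int)
--     OBJ = Suma dos listas creando una nueva lista con la suma de sus numeros
--     '''
--     long_1 = len(lista1)
--     long_2 = len(lista2)
--     suma_listas = []
--     min_num = min(long_1,long_2)
--
--     if long_1 > long_2:
--         lista_mayor = lista1[:]
--     else:
--         lista_mayor = lista2[:]
--
--     for i in range(min_num):
--         suma_listas.append(lista1[i] + lista2[i])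
--
--     suma_listas += lista_mayor[min_num:]
--
--     return suma_listas
-- ===== SOURCE B (Python) =====
-- from itertools import zip_longest
--
-- def suma_dos_listas(lista1, lista2):
--     return [a + b for a, b in zip_longest(lista1, lista2, fillvalue=0)]
-- ===== Notes on version B (the rewrite author's own statement) =====
-- stated objective: idiomatic
-- what changed: Replaces the length comparison, slice copy of the larger list, index loop over range(min) and tail append with a single pass over both lists via itertools.zip_longest(fillvalue=0).
import Mathlib
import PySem

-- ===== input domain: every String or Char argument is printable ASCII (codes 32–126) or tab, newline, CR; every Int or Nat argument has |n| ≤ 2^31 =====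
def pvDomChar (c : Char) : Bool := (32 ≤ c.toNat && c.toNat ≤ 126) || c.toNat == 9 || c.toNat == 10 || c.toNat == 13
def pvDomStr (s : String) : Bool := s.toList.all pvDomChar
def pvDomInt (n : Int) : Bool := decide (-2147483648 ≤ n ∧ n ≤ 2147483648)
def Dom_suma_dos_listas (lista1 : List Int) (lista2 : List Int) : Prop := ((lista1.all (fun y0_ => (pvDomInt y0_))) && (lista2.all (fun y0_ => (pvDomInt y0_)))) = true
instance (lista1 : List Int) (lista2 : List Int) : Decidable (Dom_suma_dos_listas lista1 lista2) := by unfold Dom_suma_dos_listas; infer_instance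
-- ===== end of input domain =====

-- B replaces A's length comparison, slice copy, index loop and tail append by one
-- simultaneous pass over both lists (zip_longest with fillvalue 0); same return value.

-- ===== PORT A =====
def suma_dos_listas (lista1 : List Int) (lista2 : List Int) : List Int :=
  let long_1 : Int := lista1.length
  let long_2 : Int := lista2.length
  let min_num : Int := min long_1 long_2
  let lista_mayor : List Int := if long_1 > long_2 then lista1 else lista2
  let suma_listas : List Int :=
    (PySem.List.pyRange 0 min_num 1).foldl
      (fun acc i => acc ++ [PySem.List.pyGetD lista1 i 0 + PySem.List.pyGetD lista2 i 0]) []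
  suma_listas ++ PySem.List.slice lista_mayor (some min_num) none

-- ===== PORT B =====
-- zip_longest(lista1, lista2, fillvalue=0), summing each pair
def zipLongestAdd : List Int → List Int → List Int
  | [], [] => []
  | [], y :: ys => (0 + y) :: zipLongestAdd [] ys
  | x :: xs, [] => (x + 0) :: zipLongestAdd xs []
  | x :: xs, y :: ys => (x + y) :: zipLongestAdd xs ys

def suma_dos_listas_alt (lista1 : List Int) (lista2 : List Int) : List Int :=
  zipLongestAdd lista1 lista2

-- ===== PRECONDITION & SPEC =====
def Spec_suma_dos_listas (lista1 : List Int) (lista2 : List Int) (out : List Int) : Prop := out = suma_dos_listas_alt lista1 lista2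
instance (lista1 : List Int) (lista2 : List Int) (out : List Int) : Decidable (Spec_suma_dos_listas lista1 lista2 out) := by unfold Spec_suma_dos_listas; infer_instance

-- ===== CLAIM (what is proved, stated in full; the proofs are below) =====
def Claim_equal_suma_dos_listas : Prop := ∀ (lista1 : List Int) (lista2 : List Int), Dom_suma_dos_listas lista1 lista2 → Spec_suma_dos_listas lista1 lista2 (suma_dos_listas lista1 lista2)

-- ===== LEMMAS AND PROOFS =====

-- A's index loop over range(min) produces zipWith (+)
lemma map_range_min (l1 l2 : List Int) :
    (PySem.List.pyRange 0 (min (l1.length : Int) (l2.length : Int)) 1).map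
      (fun i => PySem.List.pyGetD l1 i 0 + PySem.List.pyGetD l2 i 0)
    = List.zipWith (· + ·) l1 l2 := by
  have hmin : (min (l1.length : Int) (l2.length : Int)) = ((min l1.length l2.length : Nat) : Int) := by
    simp [Nat.cast_min]
  rw [hmin]
  apply List.ext_getElem
  · simp [PySem.List.length_pyRange_one]; omega
  · intro k h1 h2
    have hk1 : k < l1.length := by simp [PySem.List.length_pyRange_one] at h1; omega
    have hk2 : k < l2.length := by simp [PySem.List.length_pyRange_one] at h1; omega
    simp [PySem.List.getElem_pyRange_one, PySem.List.pyGetD_natCast,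
      List.getD_eq_getElem?_getD, hk1, hk2]

-- B equals zipWith (+) followed by the tail of the longer list
lemma zipLongestAdd_left_nil (l : List Int) : zipLongestAdd [] l = l := by
  induction l with
  | nil => simp [zipLongestAdd]
  | cons y ys ih => simp [zipLongestAdd, ih]

lemma zipLongestAdd_right_nil (l : List Int) : zipLongestAdd l [] = l := by
  induction l with
  | nil => simp [zipLongestAdd]
  | cons x xs ih => simp [zipLongestAdd, ih]

lemma zipLongestAdd_eq (l1 : List Int) : ∀ l2 : List Int,
    zipLongestAdd l1 l2 =
      List.zipWith (· + ·) l1 l2 ++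
        (if (l1.length : Int) > l2.length then l1 else l2).drop (min l1.length l2.length) := by
  induction l1 with
  | nil =>
    intro l2
    simp [zipLongestAdd_left_nil]
  | cons x xs ih =>
    intro l2
    cases l2 with
    | nil => simp [zipLongestAdd_right_nil]
    | cons y ys =>
      have := ih ys
      simp only [zipLongestAdd, List.zipWith, List.length_cons]
      by_cases h : (xs.length : Int) > (ys.length : Int)
      · simp [this, h, Nat.succ_min_succ]
      · simp [this, h, Nat.succ_min_succ]

theorem suma_eq (l1 l2 : List Int) : suma_dos_listas l1 l2 = suma_dos_listas_alt l1 l2 := by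
  unfold suma_dos_listas suma_dos_listas_alt
  dsimp only
  rw [zipLongestAdd_eq, PySem.List.foldl_append_singleton_eq_map, map_range_min]
  congr 1
  have hmin : min ((l1.length : Int)) ((l2.length : Int)) = ((min l1.length l2.length : Nat) : Int) :=
    (Nat.cast_min ..).symm
  rw [hmin, PySem.List.slice_from]
  · rw [Int.toNat_natCast]
  · positivity

-- ===== VERDICT (by name: the statement is the Claim_ definition above) =====
theorem suma_dos_listas_spec : Claim_equal_suma_dos_listas := by
  intro l1 l2 _
  unfold Spec_suma_dos_listas
  exact suma_eq l1 l2
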